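-- pv_equiv track=rewrite | github.com/Unit-Zero-Labs/tidal-protocol-research | moet_yt_borrow_cap_analysis.py | count_pool_stress_events
-- ===== SOURCE A (Python) =====
-- from typing import Dict, List, Any
--
-- def count_pool_stress_events(rebalancing_events: List) -> int:
--     """Count events that indicate pool stress (multiple rebalances in short time)"""
--
--     # Group rebalancing events by time windows (5-minute windows)
--     time_windows = {}
--
--     for event in rebalancing_events:
--         minute = event.get("minute", 0)
--         window = minute // 5  # 5-minute windows
--
--         if window not in time_windows:
--             time_windows[window] = 0
--         time_windows[window] += 1
--
--     # Count windows with high activity (>5 rebalances in 5 minutes)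
--     stress_events = sum(1 for count in time_windows.values() if count > 5)
--
--     return stress_events
-- ===== SOURCE B (Python) =====
-- from itertools import groupby
--
-- def count_pool_stress_events(rebalancing_events):
--     """Count 5-minute windows with more than 5 rebalancing events (sort + run-length scan)."""
--     windows = sorted(event.get("minute", 0) // 5 for event in rebalancing_events)
--     return sum(1 for _, grp in groupby(windows) if sum(1 for _ in grp) > 5)
-- ===== Notes on version B (the rewrite author's own statement) =====
-- stated objective: alternative
-- what changed: Replaces A's hash-dict counting pass (group counts in a dict, then scan values) by sort-then-run-length-scan: B sorts the window indices and counts maximal runs of equal adjacent values longer than 5 via itertools.groupby.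
import Mathlib
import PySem

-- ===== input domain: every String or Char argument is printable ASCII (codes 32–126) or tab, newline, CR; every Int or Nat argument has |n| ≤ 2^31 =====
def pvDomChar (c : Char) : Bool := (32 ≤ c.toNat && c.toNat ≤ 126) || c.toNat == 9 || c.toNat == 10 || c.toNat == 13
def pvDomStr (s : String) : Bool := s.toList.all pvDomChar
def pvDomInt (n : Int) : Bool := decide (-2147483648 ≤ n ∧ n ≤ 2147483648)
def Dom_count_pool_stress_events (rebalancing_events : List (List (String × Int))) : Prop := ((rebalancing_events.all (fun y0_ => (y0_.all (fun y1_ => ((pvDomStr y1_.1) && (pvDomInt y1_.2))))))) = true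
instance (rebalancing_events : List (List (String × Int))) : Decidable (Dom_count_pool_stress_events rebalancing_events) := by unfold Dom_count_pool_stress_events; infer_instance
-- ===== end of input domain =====

-- B replaces A's dict-counting pass (group counts in a dict, scan its values) by sort + run-length scan; return values proved equal on all inputs.

-- event.get("minute", 0) // 5 — the 5-minute window index of one event (computed verbatim by both Pythons)
def pvWindow (event : List (String × Int)) : Int :=
  PySem.Int.floordiv ((PySem.Dict.ofList event).getD "minute" 0) 5

-- ===== PORT A =====
def count_pool_stress_events (rebalancing_events : List (List (String × Int))) : Int :=
  let time_windows := rebalancing_events.foldl (fun tw event =>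
    let window := pvWindow event
    let tw1 := if tw.contains window then tw else tw.insert window (0 : Int)
    tw1.insert window (tw1.getD window 0 + 1)) PySem.Dict.empty
  time_windows.values.foldl (fun acc count => if count > 5 then acc + 1 else acc) 0

-- ===== PORT B =====
-- sum(1 for _, grp in groupby(windows) if sum(1 for _ in grp) > 5): consume each maximal run of equal adjacent values
def pvRuns : List Int → Int
  | [] => 0
  | x :: rest =>
    (if ((rest.takeWhile (· == x)).length + 1 : Int) > 5 then 1 else 0)
      + pvRuns (rest.dropWhile (· == x))
termination_by l => l.length
decreasing_by simpa using Nat.lt_succ_of_le (List.length_dropWhile_le _ _)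

def count_pool_stress_events_alt (rebalancing_events : List (List (String × Int))) : Int :=
  let windows := PySem.List.sorted (rebalancing_events.map pvWindow) (fun x => x) false
  pvRuns windows

-- ===== PRECONDITION & SPEC =====
def Spec_count_pool_stress_events (rebalancing_events : List (List (String × Int))) (out : Int) : Prop := out = count_pool_stress_events_alt rebalancing_events
instance (rebalancing_events : List (List (String × Int))) (out : Int) : Decidable (Spec_count_pool_stress_events rebalancing_events out) := by unfold Spec_count_pool_stress_events; infer_instance

-- ===== CLAIM (what is proved, stated in full; the proofs are below) =====
def Claim_equal_count_pool_stress_events : Prop := ∀ (rebalancing_events : List (List (String × Int))), Dom_count_pool_stress_events rebalancing_events → Spec_count_pool_stress_events rebalancing_events (count_pool_stress_events rebalancing_events)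

-- ===== LEMMAS AND PROOFS =====

-- the predicate "this window index is stressed in the window list l"
def pvStress (l : List Int) (k : Int) : Bool := decide ((5 : Int) < (l.count k : Int))

-- ---- A-side: the dict loop is Counter, the value scan is countP over the distinct windows ----

lemma pvStepA (tw : PySem.Dict Int Int) (w : Int) :
    ((if tw.contains w then tw else tw.insert w 0).insert w
      ((if tw.contains w then tw else tw.insert w 0).getD w 0 + 1))
      = tw.insert w (tw.getD w 0 + 1) := by
  by_cases hc : tw.contains w
  · simp [hc]
  · simp only [hc, Bool.false_eq_true, if_false,
      PySem.Dict.getD_insert_self, PySem.Dict.insert_insert_self,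
      PySem.Dict.getD_of_not_contains tw 0 (by simpa using hc)]

lemma pvA_eq_countP (evs : List (List (String × Int))) :
    count_pool_stress_events evs
      = ((PySem.Set.ofList (evs.map pvWindow)).countP (pvStress (evs.map pvWindow)) : Int) := by
  unfold count_pool_stress_events
  simp only [pvStepA]
  rw [show List.foldl (fun (tw : PySem.Dict Int Int) event =>
        tw.insert (pvWindow event) (tw.getD (pvWindow event) 0 + 1)) PySem.Dict.empty evs
      = (evs.map pvWindow).foldl (fun tw w => tw.insert w (tw.getD w 0 + 1)) PySem.Dict.empty from
      (List.foldl_map (f := pvWindow)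
        (g := fun (tw : PySem.Dict Int Int) w => tw.insert w (tw.getD w 0 + 1))).symm,
    PySem.Dict.foldl_insert_getD_add_one_eq_counter]
  simp only [PySem.Dict.values, PySem.Dict.items_counter, List.map_map]
  rw [show (fun (acc count : Int) => if count > 5 then acc + 1 else acc)
      = (fun acc count => if (fun c => decide ((5:Int) < c)) count = true then acc + 1 else acc)
      from by funext a c; simp,
    PySem.List.foldl_count_if, List.countP_map]
  rw [zero_add, Nat.cast_inj]
  exact List.countP_congr (fun k _ => by simp [pvStress, Function.comp])

-- ---- B-side helpers ----

lemma pvDropWhile_head_false (p : Int → Bool) (l : List Int) :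
    ∀ {y : Int} {t : List Int}, l.dropWhile p = y :: t → p y = false := by
  induction l with
  | nil => intro y t h; simp at h
  | cons a l ih =>
    intro y t h
    by_cases ha : p a
    · exact ih (by simpa [List.dropWhile_cons, ha] using h)
    · simp only [List.dropWhile_cons, ha, Bool.false_eq_true, if_false] at h
      cases h; simpa using ha

-- x does not occur in the dropWhile remainder of a sorted list headed by x
lemma pvNotMem_rest (x : Int) (rest : List Int) (hp : (x :: rest).Pairwise (· ≤ ·)) :
    x ∉ rest.dropWhile (· == x) := by
  rcases hd : rest.dropWhile (· == x) with _ | ⟨y, t⟩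
  · simp
  · have hyx : y ≠ x := by simpa using pvDropWhile_head_false _ rest hd
    have hsub : (rest.dropWhile (· == x)).Sublist rest := List.dropWhile_sublist _
    have hxy : x ≤ y := by
      have : y ∈ rest := hsub.mem (by simp [hd])
      exact (List.pairwise_cons.mp hp).1 y this
    have hxlt : x < y := lt_of_le_of_ne hxy (Ne.symm hyx)
    have hrp : (y :: t).Pairwise (· ≤ ·) := by
      rw [← hd]; exact List.Pairwise.sublist hsub (List.pairwise_cons.mp hp).2
    intro hmem
    rcases List.mem_cons.mp hmem with h | h
    · exact hyx h.symm
    · exact absurd ((List.pairwise_cons.mp hrp).1 x h) (by omega)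

-- foldl Set.add ignores an accumulator head that never occurs in the list
lemma pvFoldl_add_cons (zs : List Int) :
    ∀ (s : List Int) (x : Int), x ∉ zs →
      zs.foldl PySem.Set.add (x :: s) = x :: zs.foldl PySem.Set.add s := by
  induction zs with
  | nil => intro s x _; rfl
  | cons z zs ih =>
    intro s x hx
    have hzx : z ≠ x := fun h => hx (by simp [h])
    have hx' : x ∉ zs := fun h => hx (by simp [h])
    simp only [List.foldl_cons]
    have hstep : PySem.Set.add (x :: s) z = x :: PySem.Set.add s z := by
      simp [PySem.Set.add, PySem.Set.contains, hzx]
      split <;> simp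
    rw [hstep, ih _ x hx']

-- adding further copies of x to a set already holding x changes nothing
lemma pvFoldl_add_run (run : List Int) (x : Int) (hrun : ∀ y ∈ run, y = x) :
    ∀ s : List Int, x ∈ s → run.foldl PySem.Set.add s = s := by
  induction run with
  | nil => intro s _; rfl
  | cons r run ih =>
    intro s hs
    have hr : r = x := hrun r (by simp)
    have hstep : PySem.Set.add s r = s := by
      subst hr; simp [PySem.Set.add, PySem.Set.contains, hs]
    simp only [List.foldl_cons, hstep]
    exact ih (fun y hy => hrun y (by simp [hy])) s hs

-- ---- B-side: the run-length scan of a sorted list counts the stressed distinct windows ----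

lemma pvRuns_eq_countP :
    ∀ l : List Int, l.Pairwise (· ≤ ·) →
      pvRuns l = ((PySem.Set.ofList l).countP (pvStress l) : Int) := by
  intro l
  induction l using pvRuns.induct with
  | case1 => intro _; simp [pvRuns, PySem.Set.ofList]
  | case2 x rest ih =>
    intro hp
    set run := rest.takeWhile (· == x) with hrundef
    set rest' := rest.dropWhile (· == x) with hrestdef
    have hsplit : run ++ rest' = rest := List.takeWhile_append_dropWhile
    have hrun : ∀ y ∈ run, y = x := fun y hy => by
      simpa using List.mem_takeWhile_imp hy
    have hxnot : x ∉ rest' := pvNotMem_rest x rest hp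
    have hp' : rest'.Pairwise (· ≤ ·) :=
      List.Pairwise.sublist (List.dropWhile_sublist _) (List.pairwise_cons.mp hp).2
    -- distinct windows: Set.ofList (x :: rest) = x :: Set.ofList rest'
    have hset : PySem.Set.ofList (x :: rest) = x :: PySem.Set.ofList rest' := by
      rw [PySem.Set.ofList_eq_foldl, PySem.Set.ofList_eq_foldl]
      have h1 : PySem.Set.add ([] : List Int) x = [x] := rfl
      rw [List.foldl_cons, h1, ← hsplit, List.foldl_append,
        pvFoldl_add_run run x hrun [x] (by simp), pvFoldl_add_cons rest' [] x hxnot]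
    -- occurrence counts
    have hcx : (x :: rest).count x = run.length + 1 := by
      rw [← hsplit]
      have h0 : rest'.count x = 0 := List.count_eq_zero.mpr hxnot
      have h1 : run.count x = run.length :=
        List.count_eq_length.mpr (fun y hy => ((hrun y hy).symm ▸ rfl))
      simp [List.count_append, h0, h1, Nat.add_comm]
    have hck : ∀ k ∈ rest', (x :: rest).count k = rest'.count k := by
      intro k hk
      have hkx : x ≠ k := fun h => hxnot (h ▸ hk)
      have h1 : run.count k = 0 := List.count_eq_zero.mpr
        (fun hkr => hkx (hrun k hkr).symm)
      simp [← hsplit, List.count_append, h1, hkx]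
    -- assemble
    rw [pvRuns, hset, List.countP_cons, ih hp']
    have hpred : (PySem.Set.ofList rest' : List Int).countP (pvStress (x :: rest))
        = (PySem.Set.ofList rest' : List Int).countP (pvStress rest') := by
      apply List.countP_congr
      intro k hk
      have hk' : k ∈ rest' := (PySem.Set.mem_ofList rest' k).mp hk
      simp [pvStress, hck k hk']
    have hx : pvStress (x :: rest) x = decide ((5:Int) < (run.length : Int) + 1) := by
      rw [pvStress, hcx, decide_eq_decide]; push_cast; omega
    rw [hpred, hx]
    by_cases h5 : (5:Int) < (run.length : Int) + 1
    · rw [if_pos (by rw [← hrundef] at *; omega), if_pos (by simpa using h5)]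
      push_cast; ring
    · rw [if_neg (by rw [← hrundef] at *; omega), if_neg (by simpa using h5)]
      simp

-- ===== VERDICT (by name: the statement is the Claim_ definition above) =====
theorem count_pool_stress_events_spec : Claim_equal_count_pool_stress_events := by
  intro evs _
  unfold Spec_count_pool_stress_events count_pool_stress_events_alt
  set ws := evs.map pvWindow with hws
  set sws := PySem.List.sorted ws (fun x => x) false with hsws
  have hperm : sws.Perm ws := PySem.List.sorted_perm ws (fun x => x) false
  have hsorted : sws.Pairwise (· ≤ ·) := by
    simpa using PySem.List.sorted_pairwise ws (fun x => x)
  rw [pvA_eq_countP, pvRuns_eq_countP sws hsorted]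
  have hpredeq : pvStress sws = pvStress ws := by
    funext k; simp [pvStress, hperm.count_eq]
  have hsetperm : (PySem.Set.ofList sws : List Int).Perm (PySem.Set.ofList ws) := by
    rw [List.perm_ext_iff_of_nodup (PySem.Set.nodup_ofList _) (PySem.Set.nodup_ofList _)]
    intro a
    rw [PySem.Set.mem_ofList, PySem.Set.mem_ofList, hperm.mem_iff]
  rw [hpredeq, hsetperm.countP_eq]
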